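-- pv_equiv track=rewrite | github.com/MythiliSoundhararaja/Monday-BI-Agent | app/bi_logic.py | _pick_date_column
-- ===== SOURCE A (Python) =====
-- from typing import Optional
--
-- def _pick_date_column(columns: list[str]) -> Optional[str]:
--     """Prioritize columns for the period filter."""
--     DATE_PRIORITY = [
--         "close_date", "data_delivery_date", "tentative_close_date",
--         "probable_end_date", "created_at",
--     ]
--     for col in DATE_PRIORITY:
--         if col in columns:
--             return col
--     return None
-- ===== SOURCE B (Python) =====
-- from typing import Optional
--
-- def _pick_date_column(columns: list[str]) -> Optional[str]:
--     """Prioritize columns for the period filter."""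
--     DATE_PRIORITY = [
--         "close_date", "data_delivery_date", "tentative_close_date",
--         "probable_end_date", "created_at",
--     ]
--     rank = {name: i for i, name in enumerate(DATE_PRIORITY)}
--     ranks = [rank[c] for c in columns if c in rank]
--     if ranks:
--         return DATE_PRIORITY[min(ranks)]
--     return None
-- ===== Notes on version B (the rewrite author's own statement) =====
-- stated objective: alternative
-- what changed: B loops over the columns (not the priority list), collecting priority ranks via a precomputed rank dict, and returns the priority name of the minimum collected rank instead of short-circuiting on the first priority hit.
import Mathlib
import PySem

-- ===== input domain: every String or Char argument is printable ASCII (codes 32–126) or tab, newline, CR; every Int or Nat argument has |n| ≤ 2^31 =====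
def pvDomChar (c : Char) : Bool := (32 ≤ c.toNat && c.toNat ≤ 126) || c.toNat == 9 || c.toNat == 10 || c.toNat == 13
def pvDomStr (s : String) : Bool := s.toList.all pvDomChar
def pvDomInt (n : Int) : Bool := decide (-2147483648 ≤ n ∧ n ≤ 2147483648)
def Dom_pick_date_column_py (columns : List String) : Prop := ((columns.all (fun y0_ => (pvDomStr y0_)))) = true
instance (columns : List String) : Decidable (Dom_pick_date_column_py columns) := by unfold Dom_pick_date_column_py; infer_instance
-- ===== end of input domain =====

-- ===== PORT A =====
-- header: B scans the columns once collecting priority ranks from a dict and takes the minimum rank; alternative decomposition, same cost class.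
-- A: for col in DATE_PRIORITY: if col in columns: return col; return None
def pickAux_A (columns : List String) : List String → Option String
  | [] => none
  | c :: rest => if columns.contains c then some c else pickAux_A columns rest

def pick_date_column_py (columns : List String) : Option String :=
  pickAux_A columns ["close_date", "data_delivery_date", "tentative_close_date",
    "probable_end_date", "created_at"]

-- ===== PORT B =====
def datePriorityB : List String :=
  ["close_date", "data_delivery_date", "tentative_close_date",
   "probable_end_date", "created_at"]

-- rank = {name: i for i, name in enumerate(DATE_PRIORITY)}
def rankB : PySem.Dict String Int :=
  PySem.Dict.ofList ((PySem.List.enumerate datePriorityB 0).map (fun p => (p.2, p.1)))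

def pick_date_column_py_alt (columns : List String) : Option String :=
  -- ranks = [rank[c] for c in columns if c in rank]; if ranks: return DATE_PRIORITY[min(ranks)]
  -- (ranks nonempty ↔ min? = some)
  match PySem.List.min? (columns.filterMap (fun c => rankB.get? c)) (fun x => x) with
  | some m => PySem.List.pyGet? datePriorityB m
  | none => none

-- ===== PRECONDITION & SPEC =====
def Spec_pick_date_column_py (columns : List String) (out : Option String) : Prop := out = pick_date_column_py_alt columns
instance (columns : List String) (out : Option String) : Decidable (Spec_pick_date_column_py columns out) := by unfold Spec_pick_date_column_py; infer_instance

-- ===== CLAIM (what is proved, stated in full; the proofs are below) =====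
def Claim_equal_pick_date_column_py : Prop := ∀ (columns : List String), Dom_pick_date_column_py columns → Spec_pick_date_column_py columns (pick_date_column_py columns)

-- ===== LEMMAS AND PROOFS =====

-- characterisation of the rank dict lookup
lemma rankB_get_char (c : String) (i : Int) :
    rankB.get? c = some i ↔
      (c = "close_date" ∧ i = 0) ∨ (c = "data_delivery_date" ∧ i = 1) ∨
      (c = "tentative_close_date" ∧ i = 2) ∨ (c = "probable_end_date" ∧ i = 3) ∨
      (c = "created_at" ∧ i = 4) := by
  have h : rankB = PySem.Dict.mk
      [("close_date", 0), ("data_delivery_date", 1), ("tentative_close_date", 2),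
       ("probable_end_date", 3), ("created_at", 4)] := by decide
  rw [h]
  simp [PySem.Dict.get?]
  aesop

lemma mem_ranks_iff (columns : List String) (i : Int) :
    i ∈ columns.filterMap (fun c => rankB.get? c) ↔
      (i = 0 ∧ "close_date" ∈ columns) ∨ (i = 1 ∧ "data_delivery_date" ∈ columns) ∨
      (i = 2 ∧ "tentative_close_date" ∈ columns) ∨ (i = 3 ∧ "probable_end_date" ∈ columns) ∨
      (i = 4 ∧ "created_at" ∈ columns) := by
  simp only [List.mem_filterMap]
  constructor
  · rintro ⟨c, hc, hg⟩
    rcases (rankB_get_char c i).1 hg with ⟨rfl, rfl⟩|⟨rfl, rfl⟩|⟨rfl, rfl⟩|⟨rfl, rfl⟩|⟨rfl, rfl⟩ <;> simp [hc]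
  · rintro (⟨rfl, hc⟩|⟨rfl, hc⟩|⟨rfl, hc⟩|⟨rfl, hc⟩|⟨rfl, hc⟩) <;>
      exact ⟨_, hc, by rw [rankB_get_char]; simp⟩

lemma min?_id_eq_some {xs : List Int} {m : Int} (hmem : m ∈ xs)
    (hle : ∀ y ∈ xs, m ≤ y) : PySem.List.min? xs (fun x => x) = some m := by
  cases h : PySem.List.min? xs (fun x => x) with
  | none =>
    rw [PySem.List.min?_eq_none_iff] at h
    subst h; cases hmem
  | some m' =>
    have h1 := PySem.List.min?_mem h
    have h2 := PySem.List.min?_isMin h m hmem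
    have h3 := hle m' h1
    simp only [Option.some.injEq]
    omega

-- ===== VERDICT (by name: the statement is the Claim_ definition above) =====
theorem pick_date_column_py_spec : Claim_equal_pick_date_column_py := by
  intro columns _
  unfold Spec_pick_date_column_py
  by_cases h0 : "close_date" ∈ columns
  · have hmin := min?_id_eq_some ((mem_ranks_iff columns 0).2 (by simp [h0]))
      (by intro y hy; rcases (mem_ranks_iff columns y).1 hy with ⟨rfl,_⟩|⟨rfl,_⟩|⟨rfl,_⟩|⟨rfl,_⟩|⟨rfl,_⟩ <;> omega)
    simp [pick_date_column_py, pickAux_A, pick_date_column_py_alt, hmin, h0, datePriorityB, PySem.List.pyGet?, PySem.List.pyIdx?]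
  · by_cases h1 : "data_delivery_date" ∈ columns
    · have hmin := min?_id_eq_some ((mem_ranks_iff columns 1).2 (by simp [h1]))
        (by intro y hy; rcases (mem_ranks_iff columns y).1 hy with ⟨rfl,hc⟩|⟨rfl,_⟩|⟨rfl,_⟩|⟨rfl,_⟩|⟨rfl,_⟩ <;> first | (exact absurd hc h0) | omega)
      simp [pick_date_column_py, pickAux_A, pick_date_column_py_alt, hmin, h0, h1, datePriorityB, PySem.List.pyGet?, PySem.List.pyIdx?]
    · by_cases h2 : "tentative_close_date" ∈ columns
      · have hmin := min?_id_eq_some ((mem_ranks_iff columns 2).2 (by simp [h2]))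
          (by intro y hy; rcases (mem_ranks_iff columns y).1 hy with ⟨rfl,hc⟩|⟨rfl,hc⟩|⟨rfl,_⟩|⟨rfl,_⟩|⟨rfl,_⟩ <;> first | (exact absurd hc h0) | (exact absurd hc h1) | omega)
        simp [pick_date_column_py, pickAux_A, pick_date_column_py_alt, hmin, h0, h1, h2, datePriorityB, PySem.List.pyGet?, PySem.List.pyIdx?]
      · by_cases h3 : "probable_end_date" ∈ columns
        · have hmin := min?_id_eq_some ((mem_ranks_iff columns 3).2 (by simp [h3]))
            (by intro y hy; rcases (mem_ranks_iff columns y).1 hy with ⟨rfl,hc⟩|⟨rfl,hc⟩|⟨rfl,hc⟩|⟨rfl,_⟩|⟨rfl,_⟩ <;> first | (exact absurd hc h0) | (exact absurd hc h1) | (exact absurd hc h2) | omega)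
          simp [pick_date_column_py, pickAux_A, pick_date_column_py_alt, hmin, h0, h1, h2, h3, datePriorityB, PySem.List.pyGet?, PySem.List.pyIdx?]
        · by_cases h4 : "created_at" ∈ columns
          · have hmin := min?_id_eq_some ((mem_ranks_iff columns 4).2 (by simp [h4]))
              (by intro y hy; rcases (mem_ranks_iff columns y).1 hy with ⟨rfl,hc⟩|⟨rfl,hc⟩|⟨rfl,hc⟩|⟨rfl,hc⟩|⟨rfl,_⟩ <;> first | (exact absurd hc h0) | (exact absurd hc h1) | (exact absurd hc h2) | (exact absurd hc h3) | omega)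
            simp [pick_date_column_py, pickAux_A, pick_date_column_py_alt, hmin, h0, h1, h2, h3, h4, datePriorityB, PySem.List.pyGet?, PySem.List.pyIdx?]
          · have hnil : columns.filterMap (fun c => rankB.get? c) = [] := by
              rw [List.filterMap_eq_nil_iff]
              intro c hc
              cases hg : rankB.get? c with
              | none => rfl
              | some i =>
                rcases (rankB_get_char c i).1 hg with ⟨rfl,_⟩|⟨rfl,_⟩|⟨rfl,_⟩|⟨rfl,_⟩|⟨rfl,_⟩ <;>
                  first | (exact absurd hc h0) | (exact absurd hc h1) | (exact absurd hc h2) | (exact absurd hc h3) | (exact absurd hc h4)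
            simp [pick_date_column_py, pickAux_A, pick_date_column_py_alt, hnil, h0, h1, h2, h3, h4, PySem.List.min?]
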